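-- pv_equiv track=rewrite | github.com/yankai1996/DB-Benchmark | db_bench.py | _count_s_placeholders
-- ===== SOURCE A (Python) =====
-- def _count_s_placeholders(sql: str) -> int:
--     """Count DB-API ``%s`` placeholders; treat ``%%`` as a literal percent."""
--     n = 0
--     i = 0
--     while i < len(sql):
--         if i + 1 < len(sql) and sql[i] == "%" and sql[i + 1] == "s":
--             n += 1
--             i += 2
--             continue
--         if i + 1 < len(sql) and sql[i] == "%" and sql[i + 1] == "%":
--             i += 2
--             continue
--         i += 1
--     return n
-- ===== SOURCE B (Python) =====
-- def _count_s_placeholders(sql: str) -> int: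
--     """Count DB-API ``%s`` placeholders; treat ``%%`` as a literal percent."""
--     return sum(part.count("%s") for part in sql.split("%%"))
-- ===== Notes on version B (the rewrite author's own statement) =====
-- stated objective: faster
-- what changed: Replaced the hand-rolled per-character index-pointer scan by splitting the string on the two-character escape sequence and summing the builtin substring counts over the resulting segments.
import Mathlib
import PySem

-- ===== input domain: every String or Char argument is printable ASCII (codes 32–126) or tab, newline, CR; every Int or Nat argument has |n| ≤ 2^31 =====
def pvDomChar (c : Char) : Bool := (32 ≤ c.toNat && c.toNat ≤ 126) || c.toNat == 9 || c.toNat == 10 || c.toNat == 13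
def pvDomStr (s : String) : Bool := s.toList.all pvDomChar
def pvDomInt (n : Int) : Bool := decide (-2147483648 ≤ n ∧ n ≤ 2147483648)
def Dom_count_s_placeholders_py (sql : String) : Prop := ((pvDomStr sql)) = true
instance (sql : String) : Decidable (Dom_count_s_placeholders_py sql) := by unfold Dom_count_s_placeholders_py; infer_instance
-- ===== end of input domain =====

-- B replaces A's per-character index-pointer scan by splitting on the escape "%%" and summing per-segment "%s" counts (measured faster at a timing run's sizes).

-- ===== PORT A =====
-- A's while loop over index i (reading sql[i], sql[i+1]) becomes structural recursion
-- over the remaining characters, branches in the Python order.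
def pvALoop : List Char → Int
  | c1 :: c2 :: rest =>
      if c1 = '%' ∧ c2 = 's' then pvALoop rest + 1      -- n += 1; i += 2
      else if c1 = '%' ∧ c2 = '%' then pvALoop rest     -- i += 2
      else pvALoop (c2 :: rest)                          -- i += 1
  | [_] => 0                                             -- i + 1 = len: both tests false, i += 1, loop ends
  | [] => 0
termination_by l => l.length
decreasing_by all_goals simp

def count_s_placeholders_py (sql : String) : Int := pvALoop sql.toList

-- ===== PORT B =====
-- Source B: sum(part.count("%s") for part in sql.split("%%")); string primitives via PySem.Chars.
def count_s_placeholders_py_alt (sql : String) : Int :=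
  ((PySem.Chars.splitOn sql.toList ['%','%']).map
      (fun part => (PySem.Chars.count part ['%','s'] : Int))).sum

-- ===== PRECONDITION & SPEC =====
def Spec_count_s_placeholders_py (sql : String) (out : Int) : Prop := out = count_s_placeholders_py_alt sql
instance (sql : String) (out : Int) : Decidable (Spec_count_s_placeholders_py sql out) := by unfold Spec_count_s_placeholders_py; infer_instance

-- ===== CLAIM (what is proved, stated in full; the proofs are below) =====
def Claim_equal_count_s_placeholders_py : Prop := ∀ (sql : String), Dom_count_s_placeholders_py sql → Spec_count_s_placeholders_py sql (count_s_placeholders_py sql)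

-- ===== LEMMAS AND PROOFS =====

-- Accumulator-free characterisation of Chars.splitOn on sep = "%%":
-- pvSplitP l = (first segment, remaining segments).
def pvSplitP : List Char → List Char × List (List Char)
  | [] => ([], [])
  | c :: rest =>
      if ['%','%'].isPrefixOf (c :: rest) then
        ([], (pvSplitP (rest.drop 1)).1 :: (pvSplitP (rest.drop 1)).2)
      else
        (c :: (pvSplitP rest).1, (pvSplitP rest).2)
termination_by l => l.length
decreasing_by all_goals simp

-- Accumulator-free characterisation of Chars.count on sub = "%s".
def pvCountF : List Char → Nat
  | [] => 0
  | c :: rest =>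
      if ['%','s'].isPrefixOf (c :: rest) then pvCountF (rest.drop 1) + 1
      else pvCountF rest
termination_by l => l.length
decreasing_by all_goals simp

theorem pvSplitOn_go_eq (fuel : Nat) :
    ∀ (l cur : List Char) (acc : List (List Char)), l.length < fuel →
      PySem.Chars.splitOn.go ['%','%'] fuel l cur acc =
        acc.reverse ++ (cur.reverse ++ (pvSplitP l).1) :: (pvSplitP l).2 := by
  induction fuel with
  | zero => intro l cur acc h; omega
  | succ fuel ih =>
    intro l cur acc h
    match l with
    | [] => simp [PySem.Chars.splitOn.go, pvSplitP]
    | c :: rest =>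
      show (if ['%','%'].isPrefixOf (c :: rest) then
              PySem.Chars.splitOn.go ['%','%'] fuel (List.drop 2 (c :: rest)) [] (cur.reverse :: acc)
            else PySem.Chars.splitOn.go ['%','%'] fuel rest (c :: cur) acc) = _
      by_cases hp : ['%','%'].isPrefixOf (c :: rest)
      · rw [if_pos hp]
        rw [ih (List.drop 2 (c :: rest)) [] (cur.reverse :: acc) (by simp at h ⊢; omega)]
        simp [pvSplitP, hp]
      · rw [if_neg hp]
        rw [ih rest (c :: cur) acc (by simp at h ⊢; omega)]
        simp [pvSplitP, hp]

theorem pvSplitOn_eq (l : List Char) :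
    PySem.Chars.splitOn l ['%','%'] = ((pvSplitP l).1) :: (pvSplitP l).2 := by
  show PySem.Chars.splitOn.go ['%','%'] (l.length + 1) l [] [] = _
  rw [pvSplitOn_go_eq (l.length + 1) l [] [] (by omega)]
  simp

theorem pvCount_go_eq (fuel : Nat) :
    ∀ (l : List Char) (acc : Nat), l.length ≤ fuel →
      PySem.Chars.count.go ['%','s'] fuel l acc = acc + pvCountF l := by
  induction fuel with
  | zero =>
    intro l acc h
    have hl : l = [] := by cases l <;> simp_all
    subst hl; simp [PySem.Chars.count.go, pvCountF]
  | succ fuel ih =>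
    intro l acc h
    match l with
    | [] => simp [PySem.Chars.count.go, pvCountF]
    | c :: rest =>
      show (if ['%','s'].isPrefixOf (c :: rest) then
              PySem.Chars.count.go ['%','s'] fuel (List.drop 2 (c :: rest)) (acc + 1)
            else PySem.Chars.count.go ['%','s'] fuel rest acc) = _
      by_cases hp : ['%','s'].isPrefixOf (c :: rest)
      · rw [if_pos hp]
        rw [ih (List.drop 2 (c :: rest)) (acc + 1) (by simp at h ⊢; omega)]
        simp [pvCountF, hp]; omega
      · rw [if_neg hp]
        rw [ih rest acc (by simp at h ⊢; omega)]
        simp [pvCountF, hp]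

theorem pvCount_eq (l : List Char) : PySem.Chars.count l ['%','s'] = pvCountF l := by
  show (if (['%','s'] : List Char).isEmpty then l.length + 1
        else PySem.Chars.count.go ['%','s'] l.length l 0) = _
  rw [if_neg (by simp)]
  rw [pvCount_go_eq l.length l 0 (le_refl _)]; omega

-- B's value in accumulator-free form.
def pvBVal (l : List Char) : Int :=
  (pvCountF (pvSplitP l).1 : Int) + (((pvSplitP l).2).map (fun p => (pvCountF p : Int))).sum

theorem pvSplitP_cons_ne (c : Char) (l : List Char) (hc : c ≠ '%') :
    pvSplitP (c :: l) = (c :: (pvSplitP l).1, (pvSplitP l).2) := by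
  have h : ['%','%'].isPrefixOf (c :: l) = false := by
    cases l with
    | nil => simp [List.isPrefixOf]
    | cons d t => simp [List.isPrefixOf]; rintro h; exact absurd h.symm hc
  rw [pvSplitP, h]; simp

theorem pvCountF_cons_ne (c : Char) (l : List Char) (hc : c ≠ '%') :
    pvCountF (c :: l) = pvCountF l := by
  have h : ['%','s'].isPrefixOf (c :: l) = false := by
    cases l with
    | nil => simp [List.isPrefixOf]
    | cons d t => simp [List.isPrefixOf]; rintro h; exact absurd h.symm hc
  rw [pvCountF, h]; simp

theorem pvMain : ∀ (l : List Char), pvBVal l = pvALoop l := by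
  intro l
  induction l using pvALoop.induct with
  | case1 c1 c2 rest h ih =>
    obtain ⟨h1, h2⟩ := h; subst h1; subst h2
    rw [pvALoop]; rw [if_pos ⟨rfl, rfl⟩]
    simp only [pvBVal] at *
    rw [pvSplitP]
    rw [show (['%','%'].isPrefixOf ('%'::'s'::rest)) = false from by simp [List.isPrefixOf]]
    rw [pvSplitP_cons_ne 's' rest (by decide)]
    simp only [if_false, Bool.false_eq_true]
    rw [show pvCountF ('%'::'s'::(pvSplitP rest).1) = pvCountF (pvSplitP rest).1 + 1 from by
      rw [pvCountF, show (['%','s'].isPrefixOf ('%'::'s'::(pvSplitP rest).1)) = true from by simp [List.isPrefixOf]]; simp]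
    push_cast
    omega
  | case2 c1 c2 rest h1 h2 ih =>
    obtain ⟨h1, h2⟩ := h2; subst h1; subst h2
    rw [pvALoop]; rw [if_neg (by simp), if_pos ⟨rfl, rfl⟩]
    simp only [pvBVal] at *
    rw [pvSplitP]
    rw [show (['%','%'].isPrefixOf ('%'::'%'::rest)) = true from by simp [List.isPrefixOf]]
    simp only [if_true]
    simp only [List.drop_one, List.tail_cons, List.map_cons, List.sum_cons, pvCountF]
    push_cast
    omega
  | case3 c1 c2 rest h1 h2 ih =>
    rw [pvALoop]; rw [if_neg h1, if_neg h2]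
    by_cases hc1 : c1 = '%'
    · subst hc1
      have hc2s : c2 ≠ 's' := fun h => h1 ⟨rfl, h⟩
      have hc2p : c2 ≠ '%' := fun h => h2 ⟨rfl, h⟩
      simp only [pvBVal] at *
      rw [pvSplitP]
      rw [show (['%','%'].isPrefixOf ('%'::c2::rest)) = false from by
        simp [List.isPrefixOf]; rintro h; exact absurd h.symm hc2p]
      simp only [if_false, Bool.false_eq_true]
      rw [pvSplitP_cons_ne c2 rest hc2p] at *
      rw [show pvCountF ('%'::c2::(pvSplitP rest).1) = pvCountF (c2::(pvSplitP rest).1) from by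
        rw [pvCountF, show (['%','s'].isPrefixOf ('%'::c2::(pvSplitP rest).1)) = false from by
          simp [List.isPrefixOf]; rintro h; exact absurd h.symm hc2s]
        simp]
      exact ih
    · simp only [pvBVal] at *
      rw [pvSplitP_cons_ne c1 (c2::rest) hc1]
      rw [pvCountF_cons_ne c1 _ hc1]
      exact ih
  | case4 c =>
    simp [pvBVal, pvSplitP, pvCountF, pvALoop, List.isPrefixOf]
  | case5 => simp [pvBVal, pvSplitP, pvCountF, pvALoop]

-- ===== VERDICT (by name: the statement is the Claim_ definition above) =====
theorem count_s_placeholders_py_spec : Claim_equal_count_s_placeholders_py := by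
  intro sql _
  show count_s_placeholders_py sql = count_s_placeholders_py_alt sql
  unfold count_s_placeholders_py count_s_placeholders_py_alt
  rw [pvSplitOn_eq]
  simp only [List.map_cons, List.sum_cons, pvCount_eq]
  exact (pvMain sql.toList).symm
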